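-- pv_equiv track=rewrite | github.com/haydenji0731/off-target-probe-checker | otpc/otpc/track.py | convert_md2bit_del
-- ===== SOURCE A (Python) =====
-- def convert_md2bit_del(s):
--     running = ""
--     bit_s = ""
--     ignore = False
--     mismatch_info = []
--     for c in s:
--         if c.isdigit():
--             ignore = False
--             running += c
--         else:
--             if ignore: continue
--             if c == '^':
--                 if len(running) > 0:
--                     bit_s += '1' * int(running)
--                 running = ""
--                 ignore = True
--                 continue
--             else:
--                 if len(running) > 0:
--                     bit_s += '1' * int(running)
--                 mismatch_info.append(len(bit_s))
--                 bit_s += '0'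
--                 running = ""
--     if len(running) > 0:
--         bit_s += '1' * int(running)
--     return bit_s, mismatch_info
-- ===== SOURCE B (Python) =====
-- def convert_md2bit_del(s):
--     # Pass 1: lex the MD string into a flat token list.
--     tokens = []
--     i, n = 0, len(s)
--     while i < n:
--         c = s[i]
--         if c.isdigit():
--             j = i
--             while j < n and s[j].isdigit():
--                 j += 1
--             tokens.append(('num', s[i:j]))
--             i = j
--         elif c == '^':
--             i += 1
--             while i < n and not s[i].isdigit():
--                 i += 1
--             tokens.append(('del',))
--         else:
--             tokens.append(('mismatch',))
--             i += 1
--     # Pass 2: build the bitstring and mismatch positions from the tokens.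
--     bit_parts = []
--     length = 0
--     mismatch_info = []
--     for t in tokens:
--         if t[0] == 'num':
--             k = int(t[1])
--             bit_parts.append('1' * k)
--             length += k
--         elif t[0] == 'mismatch':
--             mismatch_info.append(length)
--             bit_parts.append('0')
--             length += 1
--     return ''.join(bit_parts), mismatch_info
-- ===== Notes on version B (the rewrite author's own statement) =====
-- stated objective: alternative
-- what changed: B replaces A's single stateful character loop (running buffer + ignore flag) with two separate passes: an index-based lexer producing a token list (num/mismatch/del), then a token walk that builds the bit parts and mismatch positions; same cost, clearer decomposition.
import Mathlib
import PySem

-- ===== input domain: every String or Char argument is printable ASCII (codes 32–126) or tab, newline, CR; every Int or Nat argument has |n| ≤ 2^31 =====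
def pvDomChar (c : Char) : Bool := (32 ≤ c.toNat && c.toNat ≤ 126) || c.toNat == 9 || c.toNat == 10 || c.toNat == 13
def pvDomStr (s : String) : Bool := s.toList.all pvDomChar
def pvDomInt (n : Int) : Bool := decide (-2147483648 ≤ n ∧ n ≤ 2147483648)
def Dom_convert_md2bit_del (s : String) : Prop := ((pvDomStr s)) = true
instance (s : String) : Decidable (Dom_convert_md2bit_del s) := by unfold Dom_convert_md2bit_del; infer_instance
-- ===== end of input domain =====

-- B re-implements A as a two-pass tokenizer (lex into tokens, then build the bitstring);
-- objective: alternative decomposition, same return value on every input.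

-- ===== PORT A =====
-- int(running) on a nonempty ASCII digit string (exact on the admitted domain)
def pvVal (l : List Char) : Nat := l.foldl (fun a c => a * 10 + (c.toNat - 48)) 0

-- one iteration of A's for-loop; state = (running, bit_s, ignore, mismatch_info)
def pvStepA (st : List Char × List Char × Bool × List Int) (c : Char) :
    List Char × List Char × Bool × List Int :=
  let (run, bits, ign, mm) := st
  if c.isDigit then (run ++ [c], bits, false, mm)
  else if ign then (run, bits, ign, mm)
  else if c = '^' then
    ([], bits ++ (if run ≠ [] then List.replicate (pvVal run) '1' else []), true, mm)
  else
    let bits' := bits ++ (if run ≠ [] then List.replicate (pvVal run) '1' else [])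
    ([], bits' ++ ['0'], ign, mm ++ [(bits'.length : Int)])

def pvLoopA (l : List Char) (st : List Char × List Char × Bool × List Int) :
    List Char × List Char × Bool × List Int := l.foldl pvStepA st

def convert_md2bit_del (s : String) : String × List Int :=
  let (run, bits, _, mm) := pvLoopA s.toList ([], [], false, [])
  (String.mk (bits ++ (if run ≠ [] then List.replicate (pvVal run) '1' else [])), mm)

-- ===== PORT B =====
inductive PvTok where
  | num : List Char → PvTok
  | mism : PvTok
  | del : PvTok
deriving DecidableEq, Repr

-- pass 1: lex the MD string into tokens
def pvLex : List Char → List PvTok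
  | [] => []
  | c :: rest =>
    if c.isDigit then
      PvTok.num (c :: rest.takeWhile Char.isDigit) :: pvLex (rest.dropWhile Char.isDigit)
    else if c = '^' then
      PvTok.del :: pvLex (rest.dropWhile (fun d => !d.isDigit))
    else
      PvTok.mism :: pvLex rest
termination_by l => l.length
decreasing_by
  · exact Nat.lt_succ_of_le (List.length_dropWhile_le _ _)
  · exact Nat.lt_succ_of_le (List.length_dropWhile_le _ _)
  · exact Nat.lt_succ_self _

-- pass 2: build bitstring and mismatch positions from the tokens
def pvBuild : List PvTok → List Char → List Int → List Char × List Int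
  | [], bits, mm => (bits, mm)
  | PvTok.num ds :: ts, bits, mm => pvBuild ts (bits ++ List.replicate (pvVal ds) '1') mm
  | PvTok.mism :: ts, bits, mm => pvBuild ts (bits ++ ['0']) (mm ++ [(bits.length : Int)])
  | PvTok.del :: ts, bits, mm => pvBuild ts bits mm

def convert_md2bit_del_alt (s : String) : String × List Int :=
  let (bits, mm) := pvBuild (pvLex s.toList) [] []
  (String.mk bits, mm)

-- ===== PRECONDITION & SPEC =====
def Spec_convert_md2bit_del (s : String) (out : String × List Int) : Prop := out = convert_md2bit_del_alt s
instance (s : String) (out : String × List Int) : Decidable (Spec_convert_md2bit_del s out) := by unfold Spec_convert_md2bit_del; infer_instance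

-- ===== CLAIM (what is proved, stated in full; the proofs are below) =====
def Claim_equal_convert_md2bit_del : Prop := ∀ (s : String), Dom_convert_md2bit_del s → Spec_convert_md2bit_del s (convert_md2bit_del s)

-- ===== LEMMAS AND PROOFS =====
-- flush of A's final state
def pvFinish (st : List Char × List Char × Bool × List Int) : List Char × List Int :=
  let (run, bits, _, mm) := st
  (bits ++ (if run ≠ [] then List.replicate (pvVal run) '1' else []), mm)

theorem pvLoopA_cons (c : Char) (t : List Char) (st : List Char × List Char × Bool × List Int) :
    pvLoopA (c :: t) st = pvLoopA t (pvStepA st c) := rfl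

-- branch equations of A's step
theorem pvStepA_digit {c : Char} (hc : c.isDigit) (run bits : List Char) (ign : Bool) (mm : List Int) :
    pvStepA (run, bits, ign, mm) c = (run ++ [c], bits, false, mm) := by
  simp [pvStepA, hc]

theorem pvStepA_ign {c : Char} (hc : ¬ c.isDigit) (run bits : List Char) (mm : List Int) :
    pvStepA (run, bits, true, mm) c = (run, bits, true, mm) := by
  simp [pvStepA, hc]

theorem pvStepA_del (run bits : List Char) (mm : List Int) :
    pvStepA (run, bits, false, mm) '^' =
      ([], bits ++ (if run ≠ [] then List.replicate (pvVal run) '1' else []), true, mm) := by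
  simp [pvStepA]

theorem pvStepA_mism {c : Char} (hc : ¬ c.isDigit) (hd : c ≠ '^') (run bits : List Char) (mm : List Int) :
    pvStepA (run, bits, false, mm) c =
      ([], (bits ++ (if run ≠ [] then List.replicate (pvVal run) '1' else [])) ++ ['0'], false,
        mm ++ [((bits ++ (if run ≠ [] then List.replicate (pvVal run) '1' else [])).length : Int)]) := by
  simp [pvStepA, hc, hd]

-- branch equations of B's lexer
theorem pvLex_nil : pvLex [] = [] := by rw [pvLex]

theorem pvLex_digit {c : Char} (hc : c.isDigit) (t : List Char) :
    pvLex (c :: t) = PvTok.num (c :: t.takeWhile Char.isDigit) :: pvLex (t.dropWhile Char.isDigit) := by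
  rw [pvLex]; simp [hc]

theorem pvLex_del (t : List Char) :
    pvLex ('^' :: t) = PvTok.del :: pvLex (t.dropWhile (fun d => !d.isDigit)) := by
  rw [pvLex]; simp

theorem pvLex_mism {c : Char} (hc : ¬ c.isDigit) (hd : c ≠ '^') (t : List Char) :
    pvLex (c :: t) = PvTok.mism :: pvLex t := by
  rw [pvLex]; simp [hc, hd]

-- A's loop consumes a digit prefix by appending it to `running`
theorem pvLoopA_digits (l : List Char) : ∀ (run bits : List Char) (mm : List Int),
    pvLoopA l (run, bits, false, mm) =
      pvLoopA (l.dropWhile Char.isDigit) (run ++ l.takeWhile Char.isDigit, bits, false, mm) := by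
  induction l with
  | nil => intro run bits mm; simp
  | cons c t ih =>
    intro run bits mm
    by_cases hc : c.isDigit
    · rw [pvLoopA_cons, pvStepA_digit hc, ih]
      simp [hc]
    · simp [hc]

-- with ignore = True and empty running, A's loop skips non-digits
theorem pvLoopA_ignore (l : List Char) : ∀ (bits : List Char) (mm : List Int),
    pvLoopA l ([], bits, true, mm) =
      pvLoopA (l.dropWhile (fun d => !d.isDigit)) ([], bits, true, mm) := by
  induction l with
  | nil => intro bits mm; simp
  | cons c t ih =>
    intro bits mm
    by_cases hc : c.isDigit
    · simp [hc]
    · rw [pvLoopA_cons, pvStepA_ign hc, ih]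
      simp [hc]

-- when the next char (if any) is a digit, the ignore flag is irrelevant
theorem pvLoopA_flag (l : List Char) (bits : List Char) (mm : List Int)
    (h : ∀ c ∈ l.head?, c.isDigit) :
    pvFinish (pvLoopA l ([], bits, true, mm)) = pvFinish (pvLoopA l ([], bits, false, mm)) := by
  cases l with
  | nil => rfl
  | cons c t =>
    have hc : c.isDigit := h c rfl
    rw [pvLoopA_cons, pvLoopA_cons, pvStepA_digit hc, pvStepA_digit hc]

theorem pvHead_dropWhile_digit (l : List Char) :
    ∀ c ∈ (l.dropWhile (fun d => !d.isDigit)).head?, c.isDigit := by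
  intro c hc
  induction l with
  | nil => simp at hc
  | cons a t ih =>
    rw [List.dropWhile_cons] at hc
    by_cases ha : a.isDigit
    · simp [ha] at hc; subst hc; exact ha
    · simp [ha] at hc; exact ih hc

-- main invariant: A's loop (empty running, ignore off) followed by the final flush
-- equals B's build over B's token list
theorem pvMain : ∀ (n : Nat) (l : List Char), l.length ≤ n → ∀ (bits : List Char) (mm : List Int),
    pvFinish (pvLoopA l ([], bits, false, mm)) = pvBuild (pvLex l) bits mm := by
  intro n
  induction n with
  | zero =>
    intro l hl bits mm
    have h0 : l = [] := List.length_eq_zero_iff.mp (Nat.le_zero.mp hl)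
    subst h0
    simp [pvLoopA, pvLex_nil, pvBuild, pvFinish]
  | succ n ih =>
    intro l hl bits mm
    cases l with
    | nil => simp [pvLoopA, pvLex_nil, pvBuild, pvFinish]
    | cons c t =>
      by_cases hc : c.isDigit
      · -- digit run
        have hds : (c :: t).takeWhile Char.isDigit = c :: t.takeWhile Char.isDigit := by
          simp [hc]
        have hdr : (c :: t).dropWhile Char.isDigit = t.dropWhile Char.isDigit := by
          simp [hc]
        rw [pvLoopA_digits, hds, hdr, pvLex_digit hc, List.nil_append]
        set ds := c :: t.takeWhile Char.isDigit with hdsdef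
        have hnil : ds ≠ [] := by simp [hdsdef]
        have hlen : (t.dropWhile Char.isDigit).length ≤ t.length := List.length_dropWhile_le _ _
        cases hrest : t.dropWhile Char.isDigit with
        | nil =>
          simp [pvLoopA, pvFinish, hnil, pvLex_nil, pvBuild]
        | cons d t' =>
          have hd : ¬ d.isDigit := by
            have := List.head?_dropWhile_not (fun x => x.isDigit) t
            rw [hrest] at this; simpa using this
          have hlen' : t'.length ≤ n := by
            have h2 : (d :: t').length ≤ t.length := hrest ▸ hlen
            simp at h2 hl; omega
          rw [pvLoopA_cons]
          by_cases hdel : d = '^'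
          · subst hdel
            rw [pvStepA_del, if_pos hnil, pvLoopA_ignore,
              pvLoopA_flag _ _ _ (pvHead_dropWhile_digit t'),
              ih _ (le_trans (List.length_dropWhile_le _ _) hlen'),
              pvLex_del, pvBuild, pvBuild]
          · rw [pvStepA_mism hd hdel, if_pos hnil, ih _ hlen',
              pvLex_mism hd hdel, pvBuild, pvBuild]
      · -- non-digit first char
        have hlen : t.length ≤ n := by simp at hl; omega
        rw [pvLoopA_cons]
        by_cases hdel : c = '^'
        · subst hdel
          rw [pvStepA_del, if_neg (by simp), pvLoopA_ignore,
            pvLoopA_flag _ _ _ (pvHead_dropWhile_digit t),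
            ih _ (le_trans (List.length_dropWhile_le _ _) hlen),
            pvLex_del, pvBuild]
          simp
        · rw [pvStepA_mism hc hdel, if_neg (by simp), ih _ hlen,
            pvLex_mism hc hdel, pvBuild]
          simp

-- ===== VERDICT (by name: the statement is the Claim_ definition above) =====
theorem convert_md2bit_del_spec : Claim_equal_convert_md2bit_del := by
  intro s _
  show convert_md2bit_del s = convert_md2bit_del_alt s
  have h := pvMain s.toList.length s.toList le_rfl [] []
  unfold convert_md2bit_del convert_md2bit_del_alt
  rcases heq : pvLoopA s.toList ([], [], false, []) with ⟨run, bits, ign, mm⟩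
  rcases heq2 : pvBuild (pvLex s.toList) [] [] with ⟨bb, bm⟩
  rw [heq, heq2] at h
  unfold pvFinish at h
  simp only [Prod.mk.injEq] at h ⊢
  exact ⟨congrArg String.mk h.1, h.2⟩
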